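-- pv_equiv track=rewrite | github.com/green-elaia/problem-solving | n으로표현.py | solution
-- ===== SOURCE A (Python) =====
-- def solution(N, number):
--     s = [set() for x in range(8)]
--     for i, x in enumerate(s, start=1):
--         x.add(int(str(N)*i))
--     for i in range(1, len(s)):
--         for j in range(i):
--             for op1 in s[j]:
--                 for op2 in s[i-j-1]:
--                     s[i].add(op1 + op2)
--                     s[i].add(op1 - op2)
--                     s[i].add(op1 * op2)
--                     if op2 != 0:
--                         s[i].add(op1 + op2)
--         if number in s[i]:
--             answer = i + 1
--             break
--     else:
--         answer = -1
--     return answer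
-- ===== SOURCE B (Python) =====
-- def solution(N, number):
--     # memoized recursion on the number of copies of N; the memo dict is a
--     # pure cache (performance only), values are independent of it
--     memo = {}
--     def reachable(k):
--         if k in memo:
--             return memo[k]
--         vals = {int(str(N) * k)}
--         for j in range(1, k):
--             for a in reachable(j):
--                 for b in reachable(k - j):
--                     vals.add(a + b)
--                     vals.add(a - b)
--                     vals.add(a * b)
--         memo[k] = vals
--         return vals
--     for k in range(2, 9):
--         if number in reachable(k):
--             return k
--     return -1
-- ===== Notes on version B (the rewrite author's own statement) =====
-- stated objective: simpler
-- what changed: Replaces A's in-place table of 8 staged sets with index juggling (s[i-j-1]) and a for-else break by a memoized recursive reachable(k) = values using exactly k copies of N, dropping A's dead duplicate-add branch, and a plain scan of k = 2..8.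
import Mathlib
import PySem

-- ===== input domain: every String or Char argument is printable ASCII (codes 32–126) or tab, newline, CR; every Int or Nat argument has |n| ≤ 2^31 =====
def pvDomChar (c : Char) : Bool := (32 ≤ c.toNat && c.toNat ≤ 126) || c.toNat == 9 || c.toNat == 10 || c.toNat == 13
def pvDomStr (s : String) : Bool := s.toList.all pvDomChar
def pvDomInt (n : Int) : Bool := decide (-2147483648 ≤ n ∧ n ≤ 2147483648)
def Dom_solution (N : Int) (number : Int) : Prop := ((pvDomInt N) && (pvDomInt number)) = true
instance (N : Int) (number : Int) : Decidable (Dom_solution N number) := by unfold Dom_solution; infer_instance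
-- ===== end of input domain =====

-- B replaces A's in-place table of 8 staged sets by a memoized recursive helper
-- reachable(k) (set of values writable with exactly k copies of N, omitting A's dead
-- duplicate-add branch) scanned for the first k in 2..8 containing number (objective: simpler).
-- Both ports model Python's 'set' with Std.HashSet Int (same membership semantics; the
-- sets are only ever consumed order-insensitively: inserts, membership tests, building
-- further sets), chosen over a linear-scan list set so the ports evaluate quickly.

-- ===== PORT A =====
-- int(str(N)*k); the .getD 0 is only reached when Python raises ValueError (N < 0),
-- which Pre_solution excludes
def pvRep (N : Int) (k : Nat) : Int :=
  (PySem.Int.ofChars? (List.flatten (List.replicate k (PySem.Int.toChars N)))).getD 0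

-- the three nested inner loops of A for one value of i; set indices are in range
-- whenever A runs them, so List.getD is exact here
def pvCombine (s : List (Std.HashSet Int)) (i : Nat) (acc0 : Std.HashSet Int) : Std.HashSet Int :=
  (List.range i).foldl (fun acc j =>
    (s.getD j ∅).toList.foldl (fun acc op1 =>
      (s.getD (i - j - 1) ∅).toList.foldl (fun acc op2 =>
        let acc1 := ((acc.insert (op1 + op2)).insert (op1 - op2)).insert (op1 * op2)
        if op2 ≠ 0 then acc1.insert (op1 + op2) else acc1) acc) acc) acc0

-- A's 'for i in range(1, len(s)) … break / else' loop
def pvALoop (number : Int) (s : List (Std.HashSet Int)) (i : Nat) : Int :=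
  if _h : i < 8 then
    let si := pvCombine s i (s.getD i ∅)
    if si.contains number then (i : Int) + 1
    else pvALoop number (s.set i si) (i + 1)
  else -1
termination_by 8 - i
decreasing_by omega

def solution (N : Int) (number : Int) : Int :=
  -- s = [set() …]; for i, x in enumerate(s, start=1): x.add(int(str(N)*i))
  let s : List (Std.HashSet Int) :=
    (List.range 8).map (fun idx => (∅ : Std.HashSet Int).insert (pvRep N (idx + 1)))
  pvALoop number s 1

-- ===== PORT B =====
-- reachable(k) from Source B, with the memo dict threaded explicitly (Python mutates the
-- closed-over dict; here it is passed in and returned)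
def pvReachM (N : Int) (k : Nat) (memo : PySem.Dict Nat (Std.HashSet Int)) :
    Std.HashSet Int × PySem.Dict Nat (Std.HashSet Int) :=
  match PySem.Dict.get? memo k with
  | some vals => (vals, memo)
  | none =>
    let q := (List.range k).attach.foldl
      (fun (p : Std.HashSet Int × PySem.Dict Nat (Std.HashSet Int)) x =>
        if _h : 1 ≤ x.1 then
          let ra := pvReachM N x.1 p.2
          let rb := pvReachM N (k - x.1) ra.2
          (List.foldl (fun acc a =>
             List.foldl (fun acc b =>
               ((acc.insert (a + b)).insert (a - b)).insert (a * b)) acc rb.1.toList)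
             p.1 ra.1.toList,
           rb.2)
        else p)
      ((∅ : Std.HashSet Int).insert (pvRep N k), memo)
    (q.1, PySem.Dict.insert q.2 k q.1)
termination_by k
decreasing_by
  · have := List.mem_range.mp x.2; omega
  · have := List.mem_range.mp x.2; omega

-- for k in range(2, 9): if number in reachable(k): return k / return -1
def pvScanM (N : Int) (number : Int) (k : Nat)
    (memo : PySem.Dict Nat (Std.HashSet Int)) : Int :=
  if k ≤ 8 then
    let r := pvReachM N k memo
    if r.1.contains number then (k : Int) else pvScanM N number (k + 1) r.2
  else -1
termination_by 9 - k
decreasing_by omega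

def solution_alt (N : Int) (number : Int) : Int :=
  pvScanM N number 2 PySem.Dict.empty

-- ===== PRECONDITION & SPEC =====
-- Pre_ excludes N < 0, on which A raises ValueError: int(str(N)*2) parses e.g. "-5-5"
def Pre_solution (N : Int) (number : Int) : Prop := 0 ≤ N
instance (N : Int) (number : Int) : Decidable (Pre_solution N number) := by
  unfold Pre_solution; infer_instance

def pvWitness_solution : Int × Int := (5, 12)

def Spec_solution (N : Int) (number : Int) (out : Int) : Prop := out = solution_alt N number
instance (N : Int) (number : Int) (out : Int) : Decidable (Spec_solution N number out) := by
  unfold Spec_solution; infer_instance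

-- ===== CLAIM (what is proved, stated in full; the proofs are below) =====
def Claim_equal_solution : Prop := ∀ (N : Int) (number : Int), Dom_solution N number → Pre_solution N number → Spec_solution N number (solution N number)

-- ===== LEMMAS AND PROOFS =====

-- the mathematical set both programs compute: values writable with exactly k copies of N
def RS (N : Int) (k : Nat) (v : Int) : Prop :=
  v = pvRep N k ∨ ∃ j : Fin k, ∃ _h : 1 ≤ j.1, ∃ a, RS N j.1 a ∧ ∃ b, RS N (k - j.1) b ∧
    (v = a + b ∨ v = a - b ∨ v = a * b)
termination_by k
decreasing_by
  · exact j.2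
  · have := j.2; omega

theorem RS_iff (N : Int) (k : Nat) (v : Int) :
    RS N k v ↔ v = pvRep N k ∨ ∃ j, 1 ≤ j ∧ j < k ∧ ∃ a, RS N j a ∧ ∃ b, RS N (k - j) b ∧
      (v = a + b ∨ v = a - b ∨ v = a * b) := by
  rw [RS]
  constructor
  · rintro (h | ⟨j, h1, rest⟩)
    · exact Or.inl h
    · exact Or.inr ⟨j.1, h1, j.2, rest⟩
  · rintro (h | ⟨j, h1, hk, rest⟩)
    · exact Or.inl h
    · exact Or.inr ⟨⟨j, hk⟩, h1, rest⟩

theorem RS_one (N : Int) (v : Int) : RS N 1 v ↔ v = pvRep N 1 := by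
  rw [RS_iff]
  constructor
  · rintro (h | ⟨j, h1, h2, _⟩)
    · exact h
    · omega
  · exact Or.inl

-- membership after a foldl of set-inserting steps
theorem mem_foldl_step {α : Type} (P : α → Int → Prop)
    (f : Std.HashSet Int → α → Std.HashSet Int)
    (hf : ∀ acc x v, v ∈ f acc x ↔ v ∈ acc ∨ P x v) :
    ∀ (l : List α) (acc : Std.HashSet Int) (v : Int),
      v ∈ List.foldl f acc l ↔ v ∈ acc ∨ ∃ x ∈ l, P x v := by
  intro l
  induction l with
  | nil => simp
  | cons x xs ih =>
    intro acc v
    simp only [List.foldl_cons, ih, hf, List.mem_cons]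
    constructor
    · rintro ((h | h) | ⟨y, hy, hP⟩)
      · exact Or.inl h
      · exact Or.inr ⟨x, Or.inl rfl, h⟩
      · exact Or.inr ⟨y, Or.inr hy, hP⟩
    · rintro (h | ⟨y, (rfl | hy), hP⟩)
      · exact Or.inl (Or.inl h)
      · exact Or.inl (Or.inr hP)
      · exact Or.inr ⟨y, hy, hP⟩

theorem mem_pairFold (la lb : List Int) (acc : Std.HashSet Int) (v : Int) :
    v ∈ List.foldl (fun acc a =>
        List.foldl (fun acc b =>
          ((acc.insert (a + b)).insert (a - b)).insert (a * b)) acc lb)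
      acc la ↔
    v ∈ acc ∨ ∃ a ∈ la, ∃ b ∈ lb, (v = a + b ∨ v = a - b ∨ v = a * b) := by
  rw [mem_foldl_step (P := fun a v => ∃ b ∈ lb, (v = a + b ∨ v = a - b ∨ v = a * b))]
  intro acc a v
  rw [mem_foldl_step (P := fun b v => v = a + b ∨ v = a - b ∨ v = a * b)]
  intro acc b v
  simp [Std.HashSet.mem_insert]; tauto

theorem mem_pvCombine (s : List (Std.HashSet Int)) (i : Nat) (acc0 : Std.HashSet Int) (v : Int) :
    v ∈ pvCombine s i acc0 ↔ v ∈ acc0 ∨ ∃ j, j < i ∧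
      ∃ a ∈ s.getD j ∅, ∃ b ∈ s.getD (i - j - 1) ∅,
        (v = a + b ∨ v = a - b ∨ v = a * b) := by
  unfold pvCombine
  rw [mem_foldl_step (P := fun j v => ∃ a ∈ (s.getD j ∅).toList, ∃ b ∈ (s.getD (i - j - 1) ∅).toList,
        (v = a + b ∨ v = a - b ∨ v = a * b))]
  · simp [List.mem_range, Std.HashSet.mem_toList]
  · intro acc j v
    rw [mem_foldl_step (P := fun a v => ∃ b ∈ (s.getD (i - j - 1) ∅).toList,
          (v = a + b ∨ v = a - b ∨ v = a * b))]
    intro acc a v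
    rw [mem_foldl_step (P := fun b v => v = a + b ∨ v = a - b ∨ v = a * b)]
    intro acc b v
    by_cases hb : b = 0 <;> simp [hb, Std.HashSet.mem_insert] <;> tauto

-- every stored memo entry is the set RS promises
def MemoGood (N : Int) (memo : PySem.Dict Nat (Std.HashSet Int)) : Prop :=
  ∀ k s, PySem.Dict.get? memo k = some s → ∀ v, v ∈ s ↔ RS N k v

theorem pvReachM_correct (N : Int) :
    ∀ (k : Nat) (memo : PySem.Dict Nat (Std.HashSet Int)), MemoGood N memo →
      (∀ v, v ∈ (pvReachM N k memo).1 ↔ RS N k v) ∧ MemoGood N (pvReachM N k memo).2 := by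
  intro k
  induction k using Nat.strong_induction_on with
  | _ k ih =>
    intro memo hm
    rw [pvReachM]
    cases hg : PySem.Dict.get? memo k with
    | some vals =>
      exact ⟨hm k vals hg, hm⟩
    | none =>
      have fold_inv : ∀ (l : List {j // j ∈ List.range k})
          (p : Std.HashSet Int × PySem.Dict Nat (Std.HashSet Int)), MemoGood N p.2 →
          MemoGood N (l.foldl (fun p x =>
            if _h : 1 ≤ x.1 then
              let ra := pvReachM N x.1 p.2
              let rb := pvReachM N (k - x.1) ra.2
              (List.foldl (fun acc a =>
                 List.foldl (fun acc b =>
                   ((acc.insert (a + b)).insert (a - b)).insert (a * b)) acc rb.1.toList)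
                 p.1 ra.1.toList,
               rb.2)
            else p) p).2 ∧
          ∀ v, v ∈ (l.foldl (fun p x =>
            if _h : 1 ≤ x.1 then
              let ra := pvReachM N x.1 p.2
              let rb := pvReachM N (k - x.1) ra.2
              (List.foldl (fun acc a =>
                 List.foldl (fun acc b =>
                   ((acc.insert (a + b)).insert (a - b)).insert (a * b)) acc rb.1.toList)
                 p.1 ra.1.toList,
               rb.2)
            else p) p).1 ↔ v ∈ p.1 ∨ ∃ x ∈ l, 1 ≤ x.1 ∧ ∃ a, RS N x.1 a ∧
              ∃ b, RS N (k - x.1) b ∧ (v = a + b ∨ v = a - b ∨ v = a * b) := by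
        intro l
        induction l with
        | nil => intro p hp; exact ⟨hp, by simp⟩
        | cons x xs ihl =>
          intro p hp
          simp only [List.foldl_cons]
          by_cases hx1 : 1 ≤ x.1
          · have hxk : x.1 < k := List.mem_range.mp x.2
            have h1 := ih x.1 hxk p.2 hp
            have h2 := ih (k - x.1) (by omega) (pvReachM N x.1 p.2).2 h1.2
            simp only [hx1, dif_pos]
            obtain ⟨hrest, hmem⟩ := ihl
              (List.foldl (fun acc a =>
                 List.foldl (fun acc b =>
                   ((acc.insert (a + b)).insert (a - b)).insert (a * b)) acc
                   (pvReachM N (k - x.1) (pvReachM N x.1 p.2).2).1.toList)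
                 p.1 (pvReachM N x.1 p.2).1.toList,
               (pvReachM N (k - x.1) (pvReachM N x.1 p.2).2).2)
              h2.2
            refine ⟨hrest, fun v => ?_⟩
            rw [hmem v, mem_pairFold]
            constructor
            · rintro ((h | ⟨a, ha, b, hb, hops⟩) | ⟨y, hy, hPy⟩)
              · exact Or.inl h
              · exact Or.inr ⟨x, List.mem_cons_self, hx1,
                  a, (h1.1 a).mp (Std.HashSet.mem_toList.mp ha),
                  b, (h2.1 b).mp (Std.HashSet.mem_toList.mp hb), hops⟩
              · exact Or.inr ⟨y, List.mem_cons_of_mem x hy, hPy⟩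
            · rintro (h | ⟨y, hy, hPy⟩)
              · exact Or.inl (Or.inl h)
              · rcases List.mem_cons.mp hy with rfl | hy'
                · obtain ⟨hy1, a, ha, b, hb, hops⟩ := hPy
                  exact Or.inl (Or.inr ⟨a, Std.HashSet.mem_toList.mpr ((h1.1 a).mpr ha),
                    b, Std.HashSet.mem_toList.mpr ((h2.1 b).mpr hb), hops⟩)
                · exact Or.inr ⟨y, hy', hPy⟩
          · simp only [hx1, dif_neg, not_false_iff]
            obtain ⟨hrest, hmem⟩ := ihl p hp
            refine ⟨hrest, fun v => ?_⟩
            rw [hmem v]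
            constructor
            · rintro (h | ⟨y, hy, hPy⟩)
              · exact Or.inl h
              · exact Or.inr ⟨y, List.mem_cons_of_mem x hy, hPy⟩
            · rintro (h | ⟨y, hy, hPy⟩)
              · exact Or.inl h
              · rcases List.mem_cons.mp hy with rfl | hy'
                · exact absurd hPy.1 hx1
                · exact Or.inr ⟨y, hy', hPy⟩
      obtain ⟨hq2, hq1⟩ := fold_inv (List.range k).attach
        ((∅ : Std.HashSet Int).insert (pvRep N k), memo) hm
      have bridge : ∀ v : Int,
          (v ∈ (∅ : Std.HashSet Int).insert (pvRep N k) ∨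
            ∃ x ∈ (List.range k).attach, 1 ≤ x.1 ∧ ∃ a, RS N x.1 a ∧
              ∃ b, RS N (k - x.1) b ∧ (v = a + b ∨ v = a - b ∨ v = a * b)) ↔ RS N k v := by
        intro v
        rw [RS_iff]
        constructor
        · rintro (h | ⟨⟨j, hj⟩, _, h1, rest⟩)
          · exact Or.inl (Eq.symm (by simpa using h))
          · exact Or.inr ⟨j, h1, List.mem_range.mp hj, rest⟩
        · rintro (h | ⟨j, h1, hjk, rest⟩)
          · exact Or.inl (by simp [h])
          · exact Or.inr ⟨⟨j, List.mem_range.mpr hjk⟩, List.mem_attach _ _, h1, rest⟩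
      refine ⟨fun v => (hq1 v).trans (bridge v), ?_⟩
      intro k' s hget v
      rw [PySem.Dict.get?_insert] at hget
      by_cases hk' : k' = k
      · subst hk'
        rw [if_pos rfl] at hget
        cases hget
        exact (hq1 v).trans (bridge v)
      · rw [if_neg hk'] at hget
        exact hq2 k' s hget v

theorem getD_set_eq {α : Type} (l : List α) (i : Nat) (x d : α) (h : i < l.length) :
    (l.set i x).getD i d = x := by
  simp [List.getD, h]

theorem getD_set_ne {α : Type} (l : List α) {i m : Nat} (x d : α) (h : m ≠ i) :
    (l.set i x).getD m d = l.getD m d := by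
  simp [List.getD, List.getElem?_set_ne (Ne.symm h)]

theorem pvALoop_eq_pvScanM (N number : Int) :
    ∀ (d i : Nat) (s : List (Std.HashSet Int)) (memo : PySem.Dict Nat (Std.HashSet Int)),
    8 - i = d → 1 ≤ i → s.length = 8 →
    (∀ m, m < i → ∀ v, (v ∈ s.getD m ∅ ↔ RS N (m + 1) v)) →
    (∀ m, i ≤ m → m < 8 → s.getD m ∅ = (∅ : Std.HashSet Int).insert (pvRep N (m + 1))) →
    MemoGood N memo →
    pvALoop number s i = pvScanM N number (i + 1) memo := by
  intro d
  induction d with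
  | zero =>
    intro i s memo hd _ _ _ _ _
    rw [pvALoop, pvScanM]
    have h8 : ¬ i < 8 := by omega
    have h9 : ¬ i + 1 ≤ 8 := by omega
    simp [h8, h9]
  | succ d ih =>
    intro i s memo hd h1 hlen hmem hsing hmemo
    have hi : i < 8 := by omega
    rw [pvALoop]
    simp only [hi, dif_pos]
    have hsi : ∀ v, v ∈ pvCombine s i (s.getD i ∅) ↔ RS N (i + 1) v := by
      intro v
      rw [mem_pvCombine, RS_iff]
      have hacc : ∀ w : Int, w ∈ s.getD i ∅ ↔ w = pvRep N (i + 1) := by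
        intro w
        rw [hsing i (le_refl i) hi]
        simp
        exact eq_comm
      rw [hacc]
      constructor
      · rintro (h | ⟨j, hj, a, ha, b, hb, hops⟩)
        · exact Or.inl h
        · refine Or.inr ⟨j + 1, by omega, by omega, a, ?_, b, ?_, hops⟩
          · exact (hmem j (by omega) a).mp ha
          · have e1 : i + 1 - (j + 1) = i - j := by omega
            rw [e1]
            have e2 : i - j = (i - j - 1) + 1 := by omega
            rw [e2]
            exact (hmem (i - j - 1) (by omega) b).mp hb
      · rintro (h | ⟨j, hj1, hjk, a, ha, b, hb, hops⟩)
        · exact Or.inl h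
        · refine Or.inr ⟨j - 1, by omega, a, ?_, b, ?_, hops⟩
          · refine (hmem (j - 1) (by omega) a).mpr ?_
            have hj : j - 1 + 1 = j := by omega
            rw [hj]
            exact ha
          · refine (hmem (i - (j - 1) - 1) (by omega) b).mpr ?_
            have hij : i - (j - 1) - 1 + 1 = i + 1 - j := by omega
            rw [hij]
            exact hb
    have hr := pvReachM_correct N (i + 1) memo hmemo
    have hcont : (pvCombine s i (s.getD i ∅)).contains number
        = (pvReachM N (i + 1) memo).1.contains number := by
      rw [Bool.eq_iff_iff, Std.HashSet.contains_iff_mem, Std.HashSet.contains_iff_mem]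
      rw [hsi number, hr.1 number]
    rw [pvScanM]
    have h8 : i + 1 ≤ 8 := by omega
    simp only [h8, if_pos, hcont]
    by_cases hc : (pvReachM N (i + 1) memo).1.contains number = true
    · simp only [hc, if_pos]
      push_cast; omega
    · simp only [Bool.not_eq_true] at hc
      simp only [hc, Bool.false_eq_true, if_false]
      apply ih (i + 1) _ _ (by omega) (by omega) (by simpa using hlen)
      · intro m hm v
        by_cases hmi : m = i
        · subst hmi
          rw [getD_set_eq _ _ _ _ (by omega)]
          exact hsi v
        · rw [getD_set_ne _ _ _ hmi]
          exact hmem m (by omega) v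
      · intro m hm1 hm2
        rw [getD_set_ne _ _ _ (by omega)]
        exact hsing m (by omega) hm2
      · exact hr.2

theorem getD_init (N : Int) (m : Nat) (hm : m < 8) :
    ((List.range 8).map (fun idx => (∅ : Std.HashSet Int).insert (pvRep N (idx + 1)))).getD m ∅
      = (∅ : Std.HashSet Int).insert (pvRep N (m + 1)) := by
  simp [List.getD, hm]

-- ===== VERDICT (by name: the statement is the Claim_ definition above) =====
theorem solution_spec : Claim_equal_solution := by
  intro N number _ _
  unfold Spec_solution solution solution_alt
  exact pvALoop_eq_pvScanM N number 7 1
    ((List.range 8).map (fun idx => (∅ : Std.HashSet Int).insert (pvRep N (idx + 1))))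
    PySem.Dict.empty
    (by omega) (by omega) (by simp)
    (by
      intro m hm v
      have hm0 : m = 0 := by omega
      subst hm0
      rw [getD_init N 0 (by omega), RS_one]
      simp
      exact eq_comm)
    (by intro m _ hm2; exact getD_init N m hm2)
    (by intro k s hget; simp [PySem.Dict.get?_empty] at hget)
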